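-- pv_equiv track=rewrite | github.com/hydrocodeir/IranDroughtMonitoring | import_data.py | detect_id_column
-- ===== SOURCE A (Python) =====
-- def detect_id_column(header: list[str]) -> str:
--     candidates = [
--         "feature_id",
--         "station_id",
--         "region_id",
--         "id",
--         "code",
--         "gid",
--         "fid",
--         "name",
--     ]
--     lower = [c.lower() for c in header]
--     for cand in candidates:
--         if cand in lower:
--             return header[lower.index(cand)]
--     # Fallback to first column
--     return header[0]
-- ===== SOURCE B (Python) =====
-- def detect_id_column(header: list[str]) -> str:
--     rank = {
--         "feature_id": 0,
--         "station_id": 1,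
--         "region_id": 2,
--         "id": 3,
--         "code": 4,
--         "gid": 5,
--         "fid": 6,
--         "name": 7,
--     }
--     best = None  # (priority rank, original-case column)
--     for col in header:
--         r = rank.get(col.lower())
--         if r is not None and (best is None or r < best[0]):
--             best = (r, col)
--     if best is not None:
--         return best[1]
--     # Fallback to first column
--     return header[0]
-- ===== Notes on version B (the rewrite author's own statement) =====
-- stated objective: alternative
-- what changed: Replaces the candidate-outer loop with repeated 'in'/'.index' scans of the header by one single pass over the header driven by a precomputed name-to-priority rank dict, tracking the best (lowest-rank, earliest) column.
import Mathlib
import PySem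

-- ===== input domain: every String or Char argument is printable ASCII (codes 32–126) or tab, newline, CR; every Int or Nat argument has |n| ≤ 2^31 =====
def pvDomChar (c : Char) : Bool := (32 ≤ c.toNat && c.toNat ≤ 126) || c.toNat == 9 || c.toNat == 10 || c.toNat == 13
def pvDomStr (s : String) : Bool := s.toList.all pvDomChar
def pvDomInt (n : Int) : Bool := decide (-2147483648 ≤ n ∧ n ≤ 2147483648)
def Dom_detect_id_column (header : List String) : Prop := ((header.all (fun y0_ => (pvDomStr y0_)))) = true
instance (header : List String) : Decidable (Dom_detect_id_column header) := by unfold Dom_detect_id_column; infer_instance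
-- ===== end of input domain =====

-- B replaces A's candidate-outer loop (repeated 'in'/'.index' scans of the header) by a single
-- rank-table-driven pass over the header tracking the best (lowest-rank, earliest) column.


-- ===== PORT A =====
def pvCandidates : List String :=
  ["feature_id", "station_id", "region_id", "id", "code", "gid", "fid", "name"]

-- A's loop over the candidates: the first candidate found in the lowered header wins.
-- header[lower.index(cand)] is always in range; the fallback header[0] raises IndexError
-- in Python exactly when header = [] (excluded by Pre_), where this port returns "" via getD.
def pvGoA (header lower : List String) : List String → String
  | [] => (PySem.List.pyGet? header 0).getD ""
  | c :: cs =>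
    match PySem.List.index? lower c with
    | some i => (PySem.List.pyGet? header (Int.ofNat i)).getD ""
    | none => pvGoA header lower cs

def detect_id_column (header : List String) : String :=
  pvGoA header (header.map PySem.Str.lower) pvCandidates

-- ===== PORT B =====
def pvRank : PySem.Dict String Int :=
  PySem.Dict.ofList [("feature_id", 0), ("station_id", 1), ("region_id", 2), ("id", 3),
    ("code", 4), ("gid", 5), ("fid", 6), ("name", 7)]

-- one step of B's single pass: keep the (rank, column) with the smallest rank, earliest first
def pvStep (best : Option (Int × String)) (col : String) : Option (Int × String) :=
  match PySem.Dict.get? pvRank (PySem.Str.lower col) with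
  | none => best
  | some r =>
    match best with
    | none => some (r, col)
    | some b => if r < b.1 then some (r, col) else best

-- the fallback header[0] raises IndexError in Python exactly when header = [] (excluded by Pre_)
def detect_id_column_alt (header : List String) : String :=
  match header.foldl pvStep none with
  | some b => b.2
  | none => (PySem.List.pyGet? header 0).getD ""

-- ===== PRECONDITION & SPEC =====
-- Pre_ excludes only header = [], where Python A (and Python B) raise IndexError on header[0].
def Pre_detect_id_column (header : List String) : Prop := header ≠ []
instance (header : List String) : Decidable (Pre_detect_id_column header) := by
  unfold Pre_detect_id_column; infer_instance
def pvWitness_detect_id_column : List String := ["Station_ID", "value"]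

def Spec_detect_id_column (header : List String) (out : String) : Prop := out = detect_id_column_alt header
instance (header : List String) (out : String) : Decidable (Spec_detect_id_column header out) := by unfold Spec_detect_id_column; infer_instance

-- ===== CLAIM (what is proved, stated in full; the proofs are below) =====
def Claim_equal_detect_id_column : Prop := ∀ (header : List String), Dom_detect_id_column header → Pre_detect_id_column header → Spec_detect_id_column header (detect_id_column header)

-- ===== LEMMAS AND PROOFS =====

-- B's fold step generalized to an explicit candidate list (rank = first index in cs)
def stepG (cs : List String) (best : Option (Int × String)) (col : String) : Option (Int × String) :=
  match (PySem.List.index? cs (PySem.Str.lower col)).map Int.ofNat with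
  | none => best
  | some r =>
    match best with
    | none => some (r, col)
    | some b => if r < b.1 then some (r, col) else best

-- the literal rank dict agrees with first-index lookup in the candidate list
lemma rank_eq (s : String) :
    PySem.Dict.get? pvRank s = (PySem.List.index? pvCandidates s).map Int.ofNat := by
  by_cases h1 : s = "feature_id"; · subst h1; decide
  by_cases h2 : s = "station_id"; · subst h2; decide
  by_cases h3 : s = "region_id"; · subst h3; decide
  by_cases h4 : s = "id"; · subst h4; decide
  by_cases h5 : s = "code"; · subst h5; decide
  by_cases h6 : s = "gid"; · subst h6; decide
  by_cases h7 : s = "fid"; · subst h7; decide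
  by_cases h8 : s = "name"; · subst h8; decide
  have hs : s ∉ pvCandidates := by
    simp [pvCandidates, h1, h2, h3, h4, h5, h6, h7, h8]
  rw [(PySem.List.index?_eq_none_iff _ _).mpr hs]
  have hmk : pvRank = PySem.Dict.mk [("feature_id", 0), ("station_id", 1), ("region_id", 2),
      ("id", 3), ("code", 4), ("gid", 5), ("fid", 6), ("name", 7)] := by decide
  rw [hmk]
  have h1' : "feature_id" ≠ s := Ne.symm h1
  have h2' : "station_id" ≠ s := Ne.symm h2
  have h3' : "region_id" ≠ s := Ne.symm h3
  have h4' : "id" ≠ s := Ne.symm h4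
  have h5' : "code" ≠ s := Ne.symm h5
  have h6' : "gid" ≠ s := Ne.symm h6
  have h7' : "fid" ≠ s := Ne.symm h7
  have h8' : "name" ≠ s := Ne.symm h8
  simp [beq_iff_eq, h1', h2', h3', h4', h5', h6', h7', h8', PySem.Dict.get?]

lemma stepG_eq : stepG pvCandidates = pvStep := by
  funext best col
  unfold pvStep stepG
  rw [rank_eq]

-- once the best has rank 0 it can never be displaced
lemma stepG_zero (cs : List String) (x : String) :
    ∀ t : List String, t.foldl (stepG cs) (some ((0 : Int), x)) = some (0, x) := by
  intro t
  induction t with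
  | nil => rfl
  | cons h tl ih =>
    have key : stepG cs (some ((0 : Int), x)) h = some (0, x) := by
      unfold stepG
      cases hidx : PySem.List.index? cs (PySem.Str.lower h) with
      | none => simp
      | some k => simp
    simpa [List.foldl_cons, key] using ih

lemma foldl_stepG_nil : ∀ (hs : List String) (acc : Option (Int × String)),
    hs.foldl (stepG []) acc = acc := by
  intro hs
  induction hs with
  | nil => intro acc; rfl
  | cons h t ih =>
    intro acc
    have key : stepG [] acc h = acc := by unfold stepG; simp [PySem.List.index?]
    simp [List.foldl_cons, key, ih]

-- if the head candidate never occurs, ranks w.r.t. (c :: cs) are the cs-ranks shifted by one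
lemma shift_lemma (c : String) (cs : List String) :
    ∀ (hs : List String) (acc : Option (Int × String)),
      (∀ x ∈ hs, PySem.Str.lower x ≠ c) →
      hs.foldl (stepG (c :: cs)) (acc.map (fun p => (p.1 + 1, p.2))) =
        (hs.foldl (stepG cs) acc).map (fun p => (p.1 + 1, p.2)) := by
  intro hs
  induction hs with
  | nil => intro acc _; rfl
  | cons h t ih =>
    intro acc hno
    have hne : c ≠ PySem.Str.lower h := fun he => hno h (List.mem_cons_self) he.symm
    have key : stepG (c :: cs) (acc.map (fun p => (p.1 + 1, p.2))) h
        = (stepG cs acc h).map (fun p => (p.1 + 1, p.2)) := by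
      unfold stepG
      rw [PySem.List.index?_cons_of_ne cs hne]
      cases hidx : PySem.List.index? cs (PySem.Str.lower h) with
      | none => cases acc <;> simp
      | some k =>
        cases acc with
        | none => simp
        | some p =>
          simp only [Option.map_some, Int.ofNat_eq_natCast]
          by_cases hlt : (k : Int) < p.1
          · rw [if_pos (by push_cast; omega), if_pos hlt]; simp
          · rw [if_neg (by push_cast; omega), if_neg hlt]; simp
    rw [List.foldl_cons, List.foldl_cons, key, ih _ (fun x hx => hno x (List.mem_cons_of_mem _ hx))]

-- if the head candidate occurs, the fold returns its first occurrence (rank 0 wins all ties)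
lemma present_lemma (c : String) (cs : List String) :
    ∀ (hs : List String) (acc : Option (Int × String)) (x : String),
      (∀ r y, acc = some (r, y) → 1 ≤ r) →
      hs.find? (fun y => PySem.Str.lower y == c) = some x →
      hs.foldl (stepG (c :: cs)) acc = some (0, x) := by
  intro hs
  induction hs with
  | nil => intro acc x _ hf; simp at hf
  | cons h t ih =>
    intro acc x hacc hf
    by_cases hlc : PySem.Str.lower h = c
    · have hx : x = h := by
        rw [List.find?_cons_of_pos (by simp [hlc])] at hf
        exact (Option.some_inj.mp hf).symm
      rw [hx]
      have key : stepG (c :: cs) acc h = some (0, h) := by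
        unfold stepG
        rw [hlc, PySem.List.index?_cons_self]
        cases acc with
        | none => simp
        | some p =>
          have h1 := hacc p.1 p.2 rfl
          simp only [Option.map_some, Int.ofNat_eq_natCast]
          rw [if_pos (by push_cast; omega)]
          simp
      rw [List.foldl_cons, key]
      exact stepG_zero (c :: cs) h t
    · have hf' : t.find? (fun y => PySem.Str.lower y == c) = some x := by
        rwa [List.find?_cons_of_neg (by simp [hlc])] at hf
      have hacc' : ∀ r y, stepG (c :: cs) acc h = some (r, y) → 1 ≤ r := by
        intro r y he
        unfold stepG at he
        rw [PySem.List.index?_cons_of_ne cs (fun hh => hlc hh.symm)] at he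
        cases hidx : PySem.List.index? cs (PySem.Str.lower h) with
        | none =>
          rw [hidx] at he; simp at he
          exact hacc r y (by cases acc <;> simp_all)
        | some k =>
          rw [hidx] at he
          simp only [Option.map_some, Int.ofNat_eq_natCast] at he
          cases acc with
          | none => simp at he; omega
          | some p =>
            have he2 : (if ((k + 1 : ℕ) : Int) < p.1 then some (((k + 1 : ℕ) : Int), h)
                else some p) = some (r, y) := he
            by_cases hlt : ((k + 1 : ℕ) : Int) < p.1
            · rw [if_pos hlt] at he2; simp at he2; omega
            · rw [if_neg hlt] at he2; exact hacc r y he2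
      rw [List.foldl_cons]
      exact ih _ x hacc' hf'

-- A's candidate recursion expressed on (candidates, header), returning an Option
def specA : List String → List String → Option String
  | [], _ => none
  | c :: cs, hs =>
    match PySem.List.index? (hs.map PySem.Str.lower) c with
    | some i => hs[i]?
    | none => specA cs hs

-- header[lower.index c] is the first header element whose lowering is c
lemma specHead (c : String) : ∀ hs : List String,
    (match PySem.List.index? (hs.map PySem.Str.lower) c with
     | some i => hs[i]?
     | none => none) = hs.find? (fun y => PySem.Str.lower y == c) := by
  intro hs
  induction hs with
  | nil => simp [PySem.List.index?]
  | cons h t ih =>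
    by_cases hlc : PySem.Str.lower h = c
    · rw [List.find?_cons_of_pos (by simp [hlc])]
      simp only [List.map_cons, hlc, PySem.List.index?_cons_self]
      simp
    · rw [List.find?_cons_of_neg (by simp [hlc])]
      simp only [List.map_cons]
      rw [PySem.List.index?_cons_of_ne (t.map PySem.Str.lower) hlc]
      rw [← ih]
      cases hidx : PySem.List.index? (t.map PySem.Str.lower) c with
      | none => simp
      | some i => simp

-- the single rank-driven pass computes exactly A's candidate-priority search
lemma main_lemma (cs : List String) : ∀ hs : List String,
    (hs.foldl (stepG cs) none).map (·.2) = specA cs hs := by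
  induction cs with
  | nil => intro hs; rw [foldl_stepG_nil]; rfl
  | cons c cs ih =>
    intro hs
    by_cases hc : ∃ x ∈ hs, PySem.Str.lower x = c
    · have hfind : ∃ x, hs.find? (fun y => PySem.Str.lower y == c) = some x := by
        obtain ⟨x, hx, hlx⟩ := hc
        have : (hs.find? (fun y => PySem.Str.lower y == c)).isSome := by
          rw [List.find?_isSome]
          exact ⟨x, hx, by simp [hlx]⟩
        exact Option.isSome_iff_exists.mp this
      obtain ⟨x, hfx⟩ := hfind
      rw [present_lemma c cs hs none x (by simp) hfx]
      show some x = specA (c :: cs) hs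
      unfold specA
      have h2 := specHead c hs
      rw [hfx] at h2
      cases hidx : PySem.List.index? (hs.map PySem.Str.lower) c with
      | none => rw [hidx] at h2; simp at h2
      | some i =>
        rw [hidx] at h2
        exact h2.symm
    · push Not at hc
      have hnone : PySem.List.index? (hs.map PySem.Str.lower) c = none := by
        rw [PySem.List.index?_eq_none_iff]
        simp only [List.mem_map, not_exists, not_and]
        intro y hy
        exact hc y hy
      have hshift := shift_lemma c cs hs none hc
      simp only [Option.map_none] at hshift
      unfold specA
      rw [hnone, hshift, ← ih hs]
      cases hs.foldl (stepG cs) none with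
      | none => rfl
      | some p => rfl

lemma goA_spec (header : List String) : ∀ cs : List String,
    pvGoA header (header.map PySem.Str.lower) cs =
      match specA cs header with
      | some x => x
      | none => (PySem.List.pyGet? header 0).getD "" := by
  intro cs
  induction cs with
  | nil => rfl
  | cons c cs ih =>
    unfold pvGoA specA
    cases hidx : PySem.List.index? (header.map PySem.Str.lower) c with
    | none => exact ih
    | some i =>
      have hi : i < header.length := by
        have := PySem.List.getElem_of_index?_eq_some hidx
        obtain ⟨hk, -, -⟩ := this
        simpa using hk
      have : PySem.List.pyGet? header (Int.ofNat i) = some header[i] := by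
        rw [Int.ofNat_eq_natCast, PySem.List.pyGet?_natCast]
        simp [hi]
      show (PySem.List.pyGet? header (Int.ofNat i)).getD ""
          = match header[i]? with
            | some x => x
            | none => (PySem.List.pyGet? header 0).getD ""
      rw [this, List.getElem?_eq_getElem hi]
      rfl

-- ===== VERDICT (by name: the statement is the Claim_ definition above) =====
theorem detect_id_column_spec : Claim_equal_detect_id_column := by
  intro header _ _
  unfold Spec_detect_id_column detect_id_column detect_id_column_alt
  rw [← stepG_eq, goA_spec header pvCandidates, ← main_lemma pvCandidates header]
  cases h : header.foldl (stepG pvCandidates) none with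
  | none => simp
  | some p => simp
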